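-- pv_equiv track=rewrite | github.com/ynikolarakis/LCMGoCloud_GenBI | backend/src/utils/document_parser.py | find_relevant_sections
-- ===== SOURCE A (Python) =====
-- _MAX_CHARS = 20000
--
-- def find_relevant_sections(full_text: str, table_names: list[str]) -> str:
--     """Find sections of the document relevant to given table names.
--
--     Returns a truncated version of relevant content, max ~20K chars.
--     """
--     if not full_text:
--         return ""
--
--     # If short enough, return everything
--     if len(full_text) <= _MAX_CHARS:
--         return full_text
--
--     # Split into paragraphs and score by table name mentions
--     paragraphs = full_text.split("\n")
--     scored: list[tuple[int, str]] = []
--     table_names_lower = [t.lower().split(".")[-1] for t in table_names]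
--
--     for para in paragraphs:
--         if not para.strip():
--             continue
--         para_lower = para.lower()
--         score = sum(1 for tn in table_names_lower if tn in para_lower)
--         scored.append((score, para))
--
--     # Sort by relevance (highest score first), then take until budget
--     scored.sort(key=lambda x: -x[0])
--     result_parts: list[str] = []
--     total = 0
--     for _score, para in scored:
--         if total + len(para) > _MAX_CHARS:
--             break
--         result_parts.append(para)
--         total += len(para)
--
--     if total < len(full_text):
--         result_parts.append(
--             f"\n[... document truncated, {len(full_text) - total} chars omitted ...]"
--         )
--
--     return "\n".join(result_parts)
-- ===== SOURCE B (Python) =====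
-- _MAX_CHARS = 20000
--
--
-- def find_relevant_sections(full_text: str, table_names: list[str]) -> str:
--     """Selection by repeated filtering instead of sorting: for each score from
--     the maximum possible down to 0, scan the paragraph list for paragraphs of
--     exactly that score (no (score, para) pairs, no sort); then find the cut
--     index where the ordered stream exceeds the budget and slice there."""
--     if not full_text:
--         return ""
--     if len(full_text) <= _MAX_CHARS:
--         return full_text
--
--     names = [t.lower().split(".")[-1] for t in table_names]
--     paras = [p for p in full_text.split("\n") if p.strip()]
--
--     def score(p: str) -> int:
--         pl = p.lower()
--         return sum(1 for tn in names if tn in pl)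
--
--     scores = [score(p) for p in paras]
--     ordered = [p for k in range(len(names), -1, -1) for p, s in zip(paras, scores) if s == k]
--
--     total = 0
--     cut = len(ordered)
--     for i, p in enumerate(ordered):
--         if total + len(p) > _MAX_CHARS:
--             cut = i
--             break
--         total += len(p)
--     kept = ordered[:cut]
--
--     note = []
--     if total < len(full_text):
--         note = ["\n[... document truncated, %d chars omitted ...]" % (len(full_text) - total)]
--     return "\n".join(kept + note)
-- ===== Notes on version B (the rewrite author's own statement) =====
-- stated objective: alternative
-- what changed: Replaces build-(score,para)-pairs-then-stable-sort-then-accumulate with selection by repeated filtering (score each paragraph once, then for each score from the maximum down scan the list for paragraphs of exactly that score) and replaces the accumulating budget loop with find-the-cut-index-then-slice.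
import Mathlib
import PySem

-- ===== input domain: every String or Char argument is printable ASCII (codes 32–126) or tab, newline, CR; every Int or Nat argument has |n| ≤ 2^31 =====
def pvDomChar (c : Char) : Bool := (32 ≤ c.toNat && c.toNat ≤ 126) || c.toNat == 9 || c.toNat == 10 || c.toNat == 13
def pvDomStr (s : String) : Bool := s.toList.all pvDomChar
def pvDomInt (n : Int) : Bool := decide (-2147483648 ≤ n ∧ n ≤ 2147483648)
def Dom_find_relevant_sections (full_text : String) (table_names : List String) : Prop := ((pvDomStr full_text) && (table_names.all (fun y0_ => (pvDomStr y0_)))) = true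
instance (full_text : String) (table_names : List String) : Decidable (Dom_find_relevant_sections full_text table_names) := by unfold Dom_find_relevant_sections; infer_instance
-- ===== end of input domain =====

-- B replaces A's build-(score,para)-pairs / stable-sort / accumulating budget loop with
-- selection by repeated filtering (one scan of the paragraph list per possible score, highest
-- first) followed by find-the-cut-index-then-slice; objective: alternative (not faster).

-- ===== PORT A =====

-- score = sum(1 for tn in table_names_lower if tn in para_lower)
def pvScoreA (tns : List String) (para_lower : String) : Int :=
  tns.foldl (fun s tn => if PySem.Str.isIn tn para_lower then s + 1 else s) 0

-- the 'for para in paragraphs' loop building scored (started from acc)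
def pvScoredFold (tns : List String) (paras : List String) (acc : List (Int × String)) : List (Int × String) :=
  paras.foldl (fun acc para =>
    if PySem.Str.strip para = "" then acc
    else acc ++ [(pvScoreA tns (PySem.Str.lower para), para)]) acc

-- the 'for _score, para in scored' budget loop with break
def pvGreedyA : List (Int × String) → List String → Int → (List String × Int)
  | [], parts, total => (parts, total)
  | (_, para) :: rest, parts, total =>
    if total + PySem.Str.len para > 20000 then (parts, total)
    else pvGreedyA rest (parts ++ [para]) (total + PySem.Str.len para)

def find_relevant_sections (full_text : String) (table_names : List String) : String :=
  if full_text = "" then ""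
  else if PySem.Str.len full_text ≤ 20000 then full_text
  else
    let paragraphs := (PySem.Str.split? full_text "\n").getD []   -- sep "\n" ≠ "": split? is some
    -- t.lower().split(".")[-1]: split? is some (sep "." ≠ "") and never returns [], so [-1] is defined
    let table_names_lower := table_names.map (fun t =>
      (PySem.List.pyGet? ((PySem.Str.split? (PySem.Str.lower t) ".").getD []) (-1)).getD "")
    let scored := pvScoredFold table_names_lower paragraphs []
    let sortedScored := PySem.List.sorted scored (fun x => -x.1)
    let res := pvGreedyA sortedScored [] 0
    let result_parts :=
      if res.2 < PySem.Str.len full_text then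
        res.1 ++ ["\n[... document truncated, " ++
          PySem.Int.toStr (PySem.Str.len full_text - res.2) ++ " chars omitted ...]"]
      else res.1
    PySem.Str.join "\n" result_parts

-- ===== PORT B =====

-- def score(p): pl = p.lower(); return sum(1 for tn in names if tn in pl)
def pvScoreSel (names : List String) (p : String) : Int :=
  let pl := PySem.Str.lower p
  ((names.filter (fun tn => PySem.Str.isIn tn pl)).map (fun _ => (1 : Int))).sum

-- ordered = [p for k in range(len(names), -1, -1) for p, s in zip(paras, scores) if s == k]
def pvOrdered (names : List String) (paras : List String) (scores : List Int) : List String :=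
  (PySem.List.pyRange (names.length : Int) (-1) (-1)).flatMap
    (fun k => ((paras.zip scores).filter (fun ps => decide (ps.2 = k))).map Prod.fst)

-- the enumerate loop locating the cut index (cut, total); without a break cut = len(ordered)
def pvCutLoop : List String → Int → Nat → Nat × Int
  | [], total, i => (i, total)
  | p :: rest, total, i =>
    if total + PySem.Str.len p > 20000 then (i, total)
    else pvCutLoop rest (total + PySem.Str.len p) (i + 1)

def find_relevant_sections_alt (full_text : String) (table_names : List String) : String :=
  if full_text = "" then ""
  else if PySem.Str.len full_text ≤ 20000 then full_text
  else
    -- t.lower().split(".")[-1]: split? is some (sep "." ≠ "") and never returns [], so [-1] is defined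
    let names := table_names.map (fun t =>
      (PySem.List.pyGet? ((PySem.Str.split? (PySem.Str.lower t) ".").getD []) (-1)).getD "")
    let paras := ((PySem.Str.split? full_text "\n").getD []).filter
      (fun p => decide (PySem.Str.strip p ≠ ""))
    let scores := paras.map (fun p => pvScoreSel names p)   -- scores = [score(p) for p in paras]
    let ordered := pvOrdered names paras scores
    let ct := pvCutLoop ordered 0 0
    let kept := PySem.List.slice ordered none (some (ct.1 : Int))   -- ordered[:cut]
    let note :=
      if ct.2 < PySem.Str.len full_text then
        ["\n[... document truncated, " ++
          PySem.Int.toStr (PySem.Str.len full_text - ct.2) ++ " chars omitted ...]"]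
      else []
    PySem.Str.join "\n" (kept ++ note)

-- ===== PRECONDITION & SPEC =====
def Spec_find_relevant_sections (full_text : String) (table_names : List String) (out : String) : Prop := out = find_relevant_sections_alt full_text table_names
instance (full_text : String) (table_names : List String) (out : String) : Decidable (Spec_find_relevant_sections full_text table_names out) := by unfold Spec_find_relevant_sections; infer_instance

-- ===== CLAIM (what is proved, stated in full; the proofs are below) =====
def Claim_equal_find_relevant_sections : Prop := ∀ (full_text : String) (table_names : List String), Dom_find_relevant_sections full_text table_names → Spec_find_relevant_sections full_text table_names (find_relevant_sections full_text table_names)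

-- ===== LEMMAS AND PROOFS =====

-- both scoring routines are the count of matching names, cast to Int
theorem scoreA_count_gen (tns : List String) (pl : String) : ∀ (a : Nat),
    tns.foldl (fun s tn => if PySem.Str.isIn tn pl then s + 1 else s) ((a : Nat) : Int)
      = (((a + tns.countP (fun tn => PySem.Str.isIn tn pl) : Nat)) : Int) := by
  induction tns with
  | nil => intro a; simp
  | cons t ts ih =>
    intro a
    simp only [List.foldl_cons, List.countP_cons]
    by_cases h : PySem.Str.isIn t pl = true
    · rw [if_pos h, if_pos h, show ((a : Int) + 1) = ((a + 1 : Nat) : Int) by push_cast; ring,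
        ih (a + 1)]
      push_cast; ring
    · rw [if_neg h, if_neg h, ih a]
      norm_num

theorem pvScoreA_eq_count (tns : List String) (pl : String) :
    pvScoreA tns pl = ((tns.countP (fun tn => PySem.Str.isIn tn pl) : Nat) : Int) := by
  simpa [pvScoreA] using scoreA_count_gen tns pl 0

theorem pvScoreSel_eq_count (tns : List String) (p : String) :
    pvScoreSel tns p =
      ((tns.countP (fun tn => PySem.Str.isIn tn (PySem.Str.lower p)) : Nat) : Int) := by
  rw [pvScoreSel, PySem.List.sum_map_const_int, List.countP_eq_length_filter]
  ring

-- A's paragraph fold builds exactly (score, para) over the strip-filtered paragraphs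
theorem scoredFold_eq_map (tns : List String) : ∀ (paras : List String) (acc : List (Int × String)),
    pvScoredFold tns paras acc =
      acc ++ (paras.filter (fun p => decide (PySem.Str.strip p ≠ ""))).map
        (fun p => (pvScoreA tns (PySem.Str.lower p), p)) := by
  intro paras
  induction paras with
  | nil => intro acc; simp [pvScoredFold]
  | cons p ps ih =>
    intro acc
    simp only [pvScoredFold, List.foldl_cons] at *
    by_cases h : PySem.Str.strip p = ""
    · rw [if_pos h, ih acc]
      simp [h]
    · rw [if_neg h, ih (acc ++ [(pvScoreA tns (PySem.Str.lower p), p)])]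
      simp [h]

theorem insertBy_cons {α : Type} (before : α → α → Bool) (x z : α) (zs : List α) :
    PySem.List.insertBy before x (z :: zs) =
      if before x z then x :: z :: zs else z :: PySem.List.insertBy before x zs := rfl

theorem insertBy_mid {α : Type} (before : α → α → Bool) (x : α) (hi lo : List α)
    (h1 : ∀ y ∈ hi, before x y = false) (h2 : ∀ y ∈ lo, before x y = true) :
    PySem.List.insertBy before x (hi ++ lo) = hi ++ x :: lo := by
  induction hi with
  | nil =>
    simp only [List.nil_append]
    cases lo with
    | nil => rfl
    | cons y ys => rw [insertBy_cons, if_pos (h2 y (by simp))]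
  | cons z zs ih =>
    rw [List.cons_append, insertBy_cons, if_neg (by simp [h1 z (by simp)]),
      ih (fun y hy => h1 y (by simp [hy])), List.cons_append]

-- stable sort by descending score = the per-score filters listed from highest score down
theorem sorted_neg_fst (K : Nat) (l : List (Int × String))
    (h : ∀ x ∈ l, ∃ k : Nat, k ≤ K ∧ x.1 = (k : Int)) :
    PySem.List.sorted l (fun x => -x.1) =
      ((List.range (K + 1)).reverse).flatMap
        (fun (k : Nat) => l.filter (fun x => decide (x.1 = (k : Int)))) := by
  induction l using List.reverseRecOn with
  | nil =>
    rw [PySem.List.sorted_eq_foldl_insertBy]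
    simp
  | append_singleton l x ih =>
    obtain ⟨s, hsK, hxs⟩ := h x (by simp)
    have hl := ih (fun y hy => h y (by simp [hy]))
    rw [PySem.List.sorted_eq_foldl_insertBy, List.foldl_append, List.foldl_cons, List.foldl_nil,
      ← PySem.List.sorted_eq_foldl_insertBy, hl]
    set before : (Int × String) → (Int × String) → Bool :=
      fun a b => decide ((fun x : Int × String => -x.1) a < (fun x : Int × String => -x.1) b) with hbef
    set m := K + 1 - s with hm
    have hsplit : List.range (K + 1) = List.range s ++ (List.range m).map (fun i => s + i) := by
      rw [show K + 1 = s + m by omega, List.range_add]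
    rw [hsplit, List.reverse_append, List.flatMap_append, List.flatMap_append]
    have hLo : ((List.range s).reverse).flatMap
          (fun (k : Nat) => (l ++ [x]).filter (fun x => decide (x.1 = (k : Int)))) =
        ((List.range s).reverse).flatMap
          (fun (k : Nat) => l.filter (fun x => decide (x.1 = (k : Int)))) := by
      apply List.flatMap_congr
      intro k hk
      rw [List.mem_reverse, List.mem_range] at hk
      rw [List.filter_append]
      have : decide (x.1 = (k : Int)) = false := by
        simp [hxs]; omega
      simp [this]
    have hm1 : m = (m - 1) + 1 := by omega
    have hHi : ((List.range m).map (fun i => s + i)).reverse =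
        (((List.range (m - 1)).map (fun i => s + (i + 1))).reverse) ++ [s] := by
      rw [hm1, List.range_succ_eq_map, List.map_cons, List.reverse_cons]
      simp [Function.comp_def]
    have hfilt_s : (l ++ [x]).filter (fun x => decide (x.1 = (s : Int))) =
        l.filter (fun x => decide (x.1 = (s : Int))) ++ [x] := by
      rw [List.filter_append]
      simp [hxs]
    have hRest : ∀ (l' : List (Int × String)),
        (((List.range (m - 1)).map (fun i => s + (i + 1))).reverse).flatMap
          (fun (k : Nat) => (l' ++ [x]).filter (fun x => decide (x.1 = (k : Int)))) =
        (((List.range (m - 1)).map (fun i => s + (i + 1))).reverse).flatMap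
          (fun (k : Nat) => l'.filter (fun x => decide (x.1 = (k : Int)))) := by
      intro l'
      apply List.flatMap_congr
      intro k hk
      rw [List.mem_reverse, List.mem_map] at hk
      obtain ⟨i, _, hik⟩ := hk
      rw [List.filter_append]
      have : decide (x.1 = (k : Int)) = false := by
        simp [hxs]; omega
      simp [this]
    rw [hLo, hHi, List.flatMap_append, List.flatMap_append, hRest l,
      List.flatMap_singleton, List.flatMap_singleton, hfilt_s]
    have hmain := insertBy_mid before x
      ((((List.range (m - 1)).map (fun i => s + (i + 1))).reverse).flatMap
          (fun (k : Nat) => l.filter (fun x => decide (x.1 = (k : Int)))) ++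
        l.filter (fun x => decide (x.1 = (s : Int))))
      (((List.range s).reverse).flatMap
        (fun (k : Nat) => l.filter (fun x => decide (x.1 = (k : Int)))))
      (by
        intro y hy
        rw [List.mem_append] at hy
        have hyk : ∃ k : Nat, s ≤ k ∧ y.1 = (k : Int) := by
          rcases hy with hy | hy
          · rw [List.mem_flatMap] at hy
            obtain ⟨k, hk, hyf⟩ := hy
            rw [List.mem_reverse, List.mem_map] at hk
            obtain ⟨i, _, hik⟩ := hk
            have := (List.mem_filter.mp hyf).2
            exact ⟨k, by omega, by simpa using this⟩
          · have := (List.mem_filter.mp hy).2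
            exact ⟨s, le_refl s, by simpa using this⟩
        obtain ⟨k, hsk, hyk⟩ := hyk
        rw [hbef]
        simp only [hxs, hyk]
        simp; omega)
      (by
        intro y hy
        rw [List.mem_flatMap] at hy
        obtain ⟨k, hk, hyf⟩ := hy
        rw [List.mem_reverse, List.mem_range] at hk
        have hyk := (List.mem_filter.mp hyf).2
        rw [hbef]
        simp only [hxs]
        simp only [decide_eq_true_eq] at hyk
        simp [hyk]; omega)
    rw [hmain]
    simp

-- A's greedy pair loop projected to paragraphs
def pvGreedyStr : List String → List String → Int → (List String × Int)
  | [], parts, total => (parts, total)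
  | para :: rest, parts, total =>
    if total + PySem.Str.len para > 20000 then (parts, total)
    else pvGreedyStr rest (parts ++ [para]) (total + PySem.Str.len para)

theorem pvGreedyA_proj (l : List (Int × String)) : ∀ (parts : List String) (total : Int),
    pvGreedyA l parts total = pvGreedyStr (l.map Prod.snd) parts total := by
  induction l with
  | nil => intro parts total; rfl
  | cons x rest ih =>
    intro parts total
    obtain ⟨s, para⟩ := x
    simp only [List.map_cons, pvGreedyA, pvGreedyStr]
    split
    · rfl
    · exact ih _ _

theorem pvCutLoop_shift (ps : List String) : ∀ (total : Int) (i : Nat),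
    pvCutLoop ps total i = ((pvCutLoop ps total 0).1 + i, (pvCutLoop ps total 0).2) := by
  induction ps with
  | nil => intro total i; simp [pvCutLoop]
  | cons p rest ih =>
    intro total i
    simp only [pvCutLoop]
    split
    · simp
    · rw [ih _ (i + 1), ih _ 1]
      simp only [Prod.mk.injEq]
      refine ⟨by omega, trivial⟩

-- the accumulating budget loop equals cut-then-take
theorem greedy_eq_cut (ps : List String) : ∀ (parts : List String) (total : Int),
    pvGreedyStr ps parts total =
      (parts ++ ps.take (pvCutLoop ps total 0).1, (pvCutLoop ps total 0).2) := by
  induction ps with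
  | nil => intro parts total; simp [pvGreedyStr, pvCutLoop]
  | cons p rest ih =>
    intro parts total
    simp only [pvGreedyStr, pvCutLoop]
    split
    · simp
    · rw [ih (parts ++ [p]) (total + PySem.Str.len p),
        pvCutLoop_shift rest (total + PySem.Str.len p) 1]
      simp [List.take_succ_cons]

-- the sorted pair stream, projected to paragraphs, is B's ordered stream
theorem ordered_eq (names paras0 : List String) :
    (PySem.List.sorted (pvScoredFold names paras0 []) (fun x => -x.1)).map Prod.snd =
      pvOrdered names (paras0.filter (fun p => decide (PySem.Str.strip p ≠ "")))
        ((paras0.filter (fun p => decide (PySem.Str.strip p ≠ ""))).map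
          (fun p => pvScoreSel names p)) := by
  set paras := paras0.filter (fun p => decide (PySem.Str.strip p ≠ "")) with hparas
  have hsc : pvScoredFold names paras0 [] =
      paras.map (fun p => (pvScoreA names (PySem.Str.lower p), p)) := by
    have h := scoredFold_eq_map names paras0 []
    rwa [List.nil_append] at h
  rw [hsc, sorted_neg_fst names.length _ (by
    intro x hx
    rw [List.mem_map] at hx
    obtain ⟨p, _, rfl⟩ := hx
    exact ⟨_, List.countP_le_length, pvScoreA_eq_count _ _⟩)]
  rw [pvOrdered, PySem.List.pyRange_neg_one_eq_reverse,
    show ((-1 : Int) + 1) = 0 by norm_num,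
    show ((names.length : Int) + 1) = (((names.length + 1 : Nat)) : Int) by push_cast; ring,
    PySem.List.pyRange_zero_natCast, List.map_flatMap, ← List.map_reverse, List.flatMap_map]
  have hz : paras.zip (paras.map (fun p => pvScoreSel names p)) =
      paras.map (fun p => (p, pvScoreSel names p)) := by
    simpa using (List.zip_map' (f := id) (g := fun p => pvScoreSel names p) (l := paras))
  rw [hz]
  apply List.flatMap_congr
  intro k _
  rw [List.filter_map, List.map_map, List.filter_map, List.map_map]
  simp only [Function.comp_def]
  have hpred : ∀ p ∈ paras,
      (decide (pvScoreA names (PySem.Str.lower p) = (k : Int)))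
        = (decide (pvScoreSel names p = (k : Int))) := by
    intro p _
    rw [pvScoreA_eq_count, pvScoreSel_eq_count]
  rw [List.filter_congr hpred]

-- ===== VERDICT (by name: the statement is the Claim_ definition above) =====
theorem find_relevant_sections_spec : Claim_equal_find_relevant_sections := by
  intro full_text table_names _
  unfold Spec_find_relevant_sections find_relevant_sections find_relevant_sections_alt
  by_cases h1 : full_text = ""
  · rw [if_pos h1, if_pos h1]
  · rw [if_neg h1, if_neg h1]
    by_cases h2 : PySem.Str.len full_text ≤ 20000
    · rw [if_pos h2, if_pos h2]
    · rw [if_neg h2, if_neg h2]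
      set names := table_names.map (fun t =>
        (PySem.List.pyGet? ((PySem.Str.split? (PySem.Str.lower t) ".").getD []) (-1)).getD "") with hnames
      set paras0 := (PySem.Str.split? full_text "\n").getD [] with hparas0
      set paras := paras0.filter (fun p => decide (PySem.Str.strip p ≠ "")) with hparas
      have key : pvGreedyA (PySem.List.sorted (pvScoredFold names paras0 []) (fun x => -x.1)) [] 0
          = ((pvOrdered names paras (paras.map (fun p => pvScoreSel names p))).take
               (pvCutLoop (pvOrdered names paras (paras.map (fun p => pvScoreSel names p))) 0 0).1,
             (pvCutLoop (pvOrdered names paras (paras.map (fun p => pvScoreSel names p))) 0 0).2) := by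
        rw [pvGreedyA_proj, ordered_eq, ← hparas, greedy_eq_cut]
        simp
      simp only [key, PySem.List.slice_to_natCast]
      split <;> simp
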